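-- pv_equiv track=rewrite | github.com/Henistein/infix_expression_parser | main.py | on_validation
-- ===== SOURCE A (Python) =====
-- def on_validation(E):
--   # remove all the parentheses and spaces
--   E = E.replace('(', " ").replace(')', " ")
--   # convert all the operations into 'o'
--   s = list(E)
--   for i in range(len(E)):
--     if s[i] in ['+', '-', '/', '*', '^']:
--       s[i] = 'o'
--
--   i = s.count('o') + 2
--   while i:
--     if ''.join(s).replace(' ', '').isdigit():
--       return 1
--
--     if 'o' in s:
--       if not (''.join([str(elem) for elem in s[:s.index('o')]])).replace(' ', '').isdigit():
--         return 0
--       s = s[s.index('o')+1:]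
--     i -= 1
--   return 0
-- ===== SOURCE B (Python) =====
-- def on_validation(E):
--   # single left-to-right scan: operator-separated segments must each contain
--   # at least one digit and nothing but digits, spaces and parentheses
--   has_digit = False
--   for c in E:
--     if c in '+-/*^':
--       if not has_digit:
--         return 0
--       has_digit = False
--     elif c.isdigit():
--       has_digit = True
--     elif c not in ' ()':
--       return 0
--   return 1 if has_digit else 0
-- ===== Notes on version B (the rewrite author's own statement) =====
-- stated objective: faster
-- what changed: B replaces A's quadratic loop (which repeatedly re-joins, re-scans and re-slices the whole character list once per operator) by a single left-to-right scan that tracks whether the current operator-separated segment has seen a digit.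
-- intended difference: On strings that contain the letter o and whose pieces between operators-or-the-letter-o are otherwise valid digit segments (e.g. the witness 1o2), A returns 1 because it first rewrites every operator to the letter o and afterwards cannot tell a literal letter o apart from an operator, while B returns 0; B's answer is the intended one since the letter o is not an operator. — e.g. on on_validation("1o2"): A returns 1, B returns 0
import Mathlib
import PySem

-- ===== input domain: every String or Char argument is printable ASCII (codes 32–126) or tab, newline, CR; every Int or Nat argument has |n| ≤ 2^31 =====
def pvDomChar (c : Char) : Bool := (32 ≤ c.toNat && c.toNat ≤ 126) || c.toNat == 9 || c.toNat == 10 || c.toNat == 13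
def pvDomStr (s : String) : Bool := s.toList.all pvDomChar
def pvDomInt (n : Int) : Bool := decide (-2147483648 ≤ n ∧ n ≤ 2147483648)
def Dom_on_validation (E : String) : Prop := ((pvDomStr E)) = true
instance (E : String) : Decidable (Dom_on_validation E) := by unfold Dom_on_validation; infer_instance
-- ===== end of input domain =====

-- B is a single left-to-right scan instead of A's repeated whole-list rescans; A's return
-- value is reproduced everywhere except the D_ corner below, where A treats the LETTER o
-- as an operator (an artefact of its operator-to-letter-o encoding) and B does not.

-- ===== PORT A =====
-- the operator characters ['+', '-', '/', '*', '^'] of the Python source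
def pvOps : List Char := ['+', '-', '/', '*', '^']

-- the `while i:` loop of A; `i` is the fuel counter
def onvalLoop : Nat → List Char → Int
  | 0, _ => 0
  | i + 1, s =>
    -- if ''.join(s).replace(' ', '').isdigit(): return 1
    if PySem.Chars.strIsdigit (PySem.Chars.replace s [' '] []) then 1
    else if 'o' ∈ s then  -- if 'o' in s:
      -- s[:s.index('o')] : s.index gives the FIRST 'o' (guarded by 'o' ∈ s),
      -- so the prefix is takeWhile (· ≠ 'o') and s[s.index('o')+1:] is the tail of dropWhile
      if ¬ (PySem.Chars.strIsdigit (PySem.Chars.replace (s.takeWhile (· ≠ 'o')) [' '] []) = true)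
      then 0
      else onvalLoop i ((s.dropWhile (· ≠ 'o')).tail)
    else onvalLoop i s

def on_validation (E : String) : Int :=
  -- E = E.replace('(', " ").replace(')', " ")
  let E1 : String := PySem.Str.replace (PySem.Str.replace E "(" " ") ")" " "
  -- s = list(E); for i in range(len(E)): if s[i] in [...]: s[i] = 'o'
  -- (an element-wise positional update: s[i] depends only on s[i], i.e. a map)
  let s : List Char := E1.toList.map (fun c => if c ∈ pvOps then 'o' else c)
  -- i = s.count('o') + 2; while i: … ; i -= 1
  onvalLoop (PySem.List.count s 'o' + 2) s

-- ===== PORT B =====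
-- single scan; `hd` = has_digit of the current operator-separated segment
def onvalScan : List Char → Bool → Int
  | [], hd => if hd then 1 else 0
  | c :: rest, hd =>
    if c ∈ pvOps then
      if !hd then 0 else onvalScan rest false
    else if PySem.Chars.isdigit c then  -- c.isdigit() on a single char
      onvalScan rest true
    else if ¬ (c = ' ' ∨ c = '(' ∨ c = ')') then 0  -- elif c not in ' ()': return 0
    else onvalScan rest hd

def on_validation_alt (E : String) : Int := onvalScan E.toList false

-- ===== PRECONDITION & SPEC =====
-- On strings that contain the letter o and whose pieces between operators-or-the-letter-o
-- are all made of digits, spaces and parentheses with at least one digit, A returns 1 (its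
-- operator-to-letter-o encoding confuses a literal letter o with an operator) while B
-- returns 0; B's answer is the intended one, the letter o is not an operator.
def D_on_validation (E : String) : Prop :=
  'o' ∈ E.toList ∧
  (E.toList.splitOnP (· ∈ "+-/*^o".toList)).all
    (fun seg => seg.all (fun c => c.isDigit || c ∈ " ()".toList) && seg.any Char.isDigit) = true
instance (E : String) : Decidable (D_on_validation E) := by
  unfold D_on_validation; infer_instance

def Spec_on_validation (E : String) (out : Int) : Prop := ¬ D_on_validation E → out = on_validation_alt E
instance (E : String) (out : Int) : Decidable (Spec_on_validation E out) := by unfold Spec_on_validation; infer_instance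

def pvDiffWitness_on_validation : String := "1o2"
def pvDiffWitnessOut_on_validation : Int × Int := (1, 0)

-- ===== CLAIM (what is proved, stated in full; the proofs are below) =====
def Claim_unchanged_on_validation : Prop := ∀ (E : String), Dom_on_validation E → Spec_on_validation E (on_validation E)
def Claim_changed_on_validation : Prop := Dom_on_validation (pvDiffWitness_on_validation) ∧ D_on_validation (pvDiffWitness_on_validation) ∧ on_validation (pvDiffWitness_on_validation) = pvDiffWitnessOut_on_validation.1 ∧ on_validation_alt (pvDiffWitness_on_validation) = pvDiffWitnessOut_on_validation.2 ∧ pvDiffWitnessOut_on_validation.1 ≠ pvDiffWitnessOut_on_validation.2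
def Claim_exact_on_validation : Prop := ∀ (E : String), Dom_on_validation E → D_on_validation E → on_validation E ≠ on_validation_alt E

-- ===== LEMMAS AND PROOFS =====

-- proof-internal validity automaton: segments separated by an operator character OR by the
-- letter 'o' must each hold a digit and nothing but digits, spaces and parentheses
def pvValid : List Char → Bool → Bool
  | [], hd => hd
  | c :: t, hd =>
    if c ∈ pvOps ∨ c = 'o' then hd && pvValid t false
    else if PySem.Chars.isdigit c then pvValid t true
    else if c = ' ' ∨ c = '(' ∨ c = ')' then pvValid t hd
    else false

-- proof-internal names for the two predicates of D_on_validation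
def pvSep (c : Char) : Bool := c ∈ pvOps || c == 'o'

def pvSegB (seg : List Char) : Bool :=
  seg.all (fun c => PySem.Chars.isdigit c || c == ' ' || c == '(' || c == ')')
    && seg.any PySem.Chars.isdigit

theorem pvSep_eq : (fun c => decide (c ∈ "+-/*^o".toList)) = pvSep := by
  funext c
  simp only [pvSep, pvOps, List.mem_cons, List.not_mem_nil, or_false,
    show ("+-/*^o").toList = ['+', '-', '/', '*', '^', 'o'] from rfl]
  rcases Decidable.em (c = 'o') with h | h <;> simp [h]

theorem isdigit_eq (c : Char) : PySem.Chars.isdigit c = c.isDigit := by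
  simp [PySem.Chars.isdigit, Char.isDigit]
  constructor

theorem pvSegB_eq :
    (fun seg : List Char =>
      seg.all (fun c => c.isDigit || c ∈ " ()".toList) && seg.any Char.isDigit) = pvSegB := by
  funext seg
  simp only [pvSegB, isdigit_eq]
  congr 1
  refine List.all_congr rfl (fun c => ?_)
  simp only [show (" ()").toList = [' ', '(', ')'] from rfl, List.mem_cons, List.not_mem_nil]
  rw [Bool.eq_iff_iff]
  by_cases h1 : c = ' ' <;> by_cases h2 : c = '(' <;> by_cases h3 : c = ')' <;>
    simp [h1, h2, h3, beq_iff_eq]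

-- Prop form of pvSegB
def pvSegOK (seg : List Char) : Prop :=
  (∀ c ∈ seg, PySem.Chars.isdigit c = true ∨ c = ' ' ∨ c = '(' ∨ c = ')')
    ∧ (∃ c ∈ seg, PySem.Chars.isdigit c = true)

theorem pvSegB_eq_true_iff (seg : List Char) : pvSegB seg = true ↔ pvSegOK seg := by
  simp [pvSegB, pvSegOK, List.all_eq_true, List.any_eq_true, or_assoc]

-- pvValid agrees with the declarative splitOnP description used by D_on_validation
theorem pvValid_splitOnP : ∀ (l : List Char) (hd : Bool),
    pvValid l hd = true ↔
      ((∀ c ∈ (l.splitOnP pvSep).headI, PySem.Chars.isdigit c = true ∨ c = ' ' ∨ c = '(' ∨ c = ')')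
        ∧ (hd = true ∨ ∃ c ∈ (l.splitOnP pvSep).headI, PySem.Chars.isdigit c = true)
        ∧ ∀ seg ∈ (l.splitOnP pvSep).tail, pvSegOK seg) := by
  intro l
  induction l with
  | nil =>
    intro hd
    simp [pvValid, List.splitOnP_nil]
  | cons x xs ih =>
    intro hd
    rcases hsp : xs.splitOnP pvSep with _ | ⟨s, ts⟩
    · exact absurd hsp (List.splitOnP_ne_nil _ _)
    by_cases hp : pvSep x = true
    · have hx : x ∈ pvOps ∨ x = 'o' := by
        rcases Bool.or_eq_true_iff.mp hp with h | h
        · exact Or.inl (by simpa using h)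
        · exact Or.inr (by simpa using h)
      rw [List.splitOnP_cons]
      simp only [hp, if_pos]
      have hxs := ih false
      rw [hsp] at hxs
      simp only [List.headI, List.tail] at hxs ⊢
      simp [pvValid, hx, hxs, hsp, pvSegOK]
      tauto
    · have hx : ¬ (x ∈ pvOps ∨ x = 'o') := by
        intro hc
        apply hp
        rcases hc with h | h
        · simp [pvSep, h]
        · simp [pvSep, h]
      rw [List.splitOnP_cons]
      simp only [Bool.not_eq_true] at hp
      simp only [hp, Bool.false_eq_true, hsp, List.modifyHead_cons, if_false]
      have hxs := ih
      simp only [hsp, List.headI, List.tail] at hxs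
      by_cases hdig : PySem.Chars.isdigit x = true
      · simp [pvValid, hx, hdig, hxs true, List.headI, List.tail]
      · by_cases hskip : x = ' ' ∨ x = '(' ∨ x = ')'
        · simp only [List.headI, List.tail]
          rw [show pvValid (x :: xs) hd = pvValid xs hd by
            simp [pvValid, hx, hdig, hskip]]
          rw [hxs hd]
          constructor
          · rintro ⟨hok, hany, hts⟩
            refine ⟨fun c hc => ?_, ?_, hts⟩
            · rcases List.mem_cons.mp hc with h | h
              · exact h ▸ Or.inr hskip
              · exact hok c h
            · rcases hany with h | ⟨c, hc, hcd⟩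
              · exact Or.inl h
              · exact Or.inr ⟨c, List.mem_cons_of_mem _ hc, hcd⟩
          · rintro ⟨hok, hany, hts⟩
            refine ⟨fun c hc => hok c (List.mem_cons_of_mem _ hc), ?_, hts⟩
            rcases hany with h | ⟨c, hc, hcd⟩
            · exact Or.inl h
            · rcases List.mem_cons.mp hc with h | h
              · exact absurd (h ▸ hcd) (by simpa using hdig)
              · exact Or.inr ⟨c, h, hcd⟩
        · simp only [List.headI, List.tail]
          rw [show pvValid (x :: xs) hd = false by
            simp [pvValid, hx, hdig, hskip]]
          simp only [Bool.false_eq_true, false_iff]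
          rintro ⟨hok, -, -⟩
          rcases hok x (List.mem_cons_self ..) with h | h
          · exact absurd h (by simpa using hdig)
          · exact hskip h

theorem pvValid_false_iff (l : List Char) :
    pvValid l false = true ↔ (l.splitOnP pvSep).all pvSegB = true := by
  rw [pvValid_splitOnP]
  rcases h : l.splitOnP pvSep with _ | ⟨s, ts⟩
  · exact absurd h (List.splitOnP_ne_nil _ _)
  · simp only [List.headI, List.tail, List.all_cons, Bool.and_eq_true, List.all_eq_true,
      pvSegB_eq_true_iff, pvSegOK]
    tauto

-- str.replace with a single-character pattern, element by element
theorem chars_replace_go_single (a : Char) (new : List Char) :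
    ∀ (l acc : List Char),
      PySem.Chars.replace.go [a] new l.length l acc
        = acc.reverse ++ l.flatMap (fun c => if c = a then new else [c]) := by
  intro l
  induction l with
  | nil => intro acc; simp [PySem.Chars.replace.go]
  | cons c t ih =>
    intro acc
    show PySem.Chars.replace.go [a] new (t.length + 1) (c :: t) acc = _
    rw [PySem.Chars.replace.go]
    by_cases hc : c = a
    · subst hc
      simp [List.isPrefixOf, ih]

    · have : ([a].isPrefixOf (c :: t)) = false := by
        simp [List.isPrefixOf]
        exact fun h => absurd h.symm hc
      simp [this, hc, ih]

theorem chars_replace_single (a : Char) (new l : List Char) :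
    PySem.Chars.replace l [a] new = l.flatMap (fun c => if c = a then new else [c]) := by
  show PySem.Chars.replace l [a] new = _
  rw [PySem.Chars.replace]
  simp [chars_replace_go_single]

theorem chars_replace_single_map (a b : Char) (l : List Char) :
    PySem.Chars.replace l [a] [b] = l.map (fun c => if c = a then b else c) := by
  rw [chars_replace_single]
  induction l with
  | nil => rfl
  | cons c t ih => by_cases hc : c = a <;> simp [hc, ih]

-- ''.join(s).replace(' ','').isdigit() as an all/any condition
theorem flat_nospace_all (t : List Char) :
    (t.all (fun a => (if a = ' ' then ([] : List Char) else [a]).all PySem.Chars.isdigit))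
      = t.all (fun c => PySem.Chars.isdigit c || c == ' ') := by
  induction t with
  | nil => rfl
  | cons c t ih =>
    by_cases hc : c = ' '
    · subst hc; simpa [PySem.Chars.isdigit] using ih
    · by_cases hd : PySem.Chars.isdigit c = true <;> simp [hc, hd, ih]

theorem strIsdigit_nospace (t : List Char) :
    PySem.Chars.strIsdigit (PySem.Chars.replace t [' '] [])
      = (t.all (fun c => PySem.Chars.isdigit c || c == ' ') && t.any PySem.Chars.isdigit) := by
  rw [chars_replace_single]
  induction t with
  | nil => rfl
  | cons c t ih =>
    by_cases hc : c = ' '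
    · subst hc
      simpa [PySem.Chars.strIsdigit, PySem.Chars.isdigit] using ih
    · by_cases hd : PySem.Chars.isdigit c = true
      · simp [hc, hd, PySem.Chars.strIsdigit]
        exact flat_nospace_all t
      · simp [hc, hd, PySem.Chars.strIsdigit]

-- a list with 'o' in it is never all digits/spaces
theorem strIsdigit_nospace_of_mem_o (s : List Char) (h : 'o' ∈ s) :
    PySem.Chars.strIsdigit (PySem.Chars.replace s [' '] []) = false := by
  rw [strIsdigit_nospace]
  have : s.all (fun c => PySem.Chars.isdigit c || c == ' ') = false := by
    rw [List.all_eq_false]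
    exact ⟨'o', h, by decide⟩
  simp [this]

-- pvValid on a separator-free, parenthesis-free list
theorem pvValid_plain (t : List Char)
    (h : ∀ c ∈ t, c ∉ pvOps ∧ c ≠ 'o' ∧ c ≠ '(' ∧ c ≠ ')') (hd : Bool) :
    pvValid t hd = (t.all (fun c => PySem.Chars.isdigit c || c == ' ') && (hd || t.any PySem.Chars.isdigit)) := by
  induction t generalizing hd with
  | nil => cases hd <;> rfl
  | cons c t ih =>
    obtain ⟨hop, hoo, hp1, hp2⟩ := h c (List.mem_cons_self ..)
    have ht : ∀ c ∈ t, c ∉ pvOps ∧ c ≠ 'o' ∧ c ≠ '(' ∧ c ≠ ')' :=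
      fun c hc => h c (List.mem_cons_of_mem _ hc)
    by_cases hd1 : PySem.Chars.isdigit c = true
    · have hsep : ¬ (c ∈ pvOps ∨ c = 'o') := by tauto
      simp [pvValid, hsep, hd1, ih ht]
    · by_cases hsp : c = ' '
      · subst hsp
        simp [pvValid, ih ht, hd1, hop, hoo]
      · have hsep : ¬ (c ∈ pvOps ∨ c = 'o') := by tauto
        simp [pvValid, hsep, hd1, hsp, hp1, hp2]

-- pvValid across the first 'o' separator
theorem pvValid_split (r : List Char) :
    ∀ (t : List Char), (∀ c ∈ t, c ∉ pvOps ∧ c ≠ 'o' ∧ c ≠ '(' ∧ c ≠ ')') → ∀ hd,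
      pvValid (t ++ 'o' :: r) hd
        = ((t.all (fun c => PySem.Chars.isdigit c || c == ' ') && (hd || t.any PySem.Chars.isdigit))
            && pvValid r false) := by
  intro t
  induction t with
  | nil =>
    intro _ hd
    simp [pvValid]
  | cons c t ih =>
    intro h hd
    obtain ⟨hop, hoo, hp1, hp2⟩ := h c (List.mem_cons_self ..)
    have ht : ∀ c ∈ t, c ∉ pvOps ∧ c ≠ 'o' ∧ c ≠ '(' ∧ c ≠ ')' :=
      fun c hc => h c (List.mem_cons_of_mem _ hc)
    by_cases hd1 : PySem.Chars.isdigit c = true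
    · have hsep : ¬ (c ∈ pvOps ∨ c = 'o') := by tauto
      simp [pvValid, hsep, hd1, ih ht]
    · by_cases hsp : c = ' '
      · subst hsp
        simp [pvValid, ih ht, hd1, hop, hoo]
      · have hsep : ¬ (c ∈ pvOps ∨ c = 'o') := by tauto
        simp [pvValid, hsep, hd1, hsp, hp1, hp2]

theorem dropWhile_o_cons : ∀ {s : List Char}, 'o' ∈ s →
    s.dropWhile (· ≠ 'o') = 'o' :: (s.dropWhile (· ≠ 'o')).tail := by
  intro s
  induction s with
  | nil => intro h; cases h
  | cons c t ih =>
    intro h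
    by_cases hc : c = 'o'
    · subst hc; simp [List.dropWhile]
    · have : 'o' ∈ t := by
        rcases List.mem_cons.mp h with h1 | h1
        · exact absurd h1.symm hc
        · exact h1
      simpa [List.dropWhile, hc] using ih this

-- A's loop gets stuck and counts down to 0 once no 'o' is left and the rest is not all digits
theorem onvalLoop_stuck : ∀ (fuel : Nat) (s : List Char),
    PySem.Chars.strIsdigit (PySem.Chars.replace s [' '] []) = false → 'o' ∉ s →
    onvalLoop fuel s = 0 := by
  intro fuel
  induction fuel with
  | zero => intro s _ _; rfl
  | succ n ih => intro s h1 h2; simp [onvalLoop, h1, h2, ih s h1 h2]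

-- one step of A's loop when an 'o' separator is present
theorem onvalLoop_succ_mem (n : Nat) (s : List Char)
    (h1 : PySem.Chars.strIsdigit (PySem.Chars.replace s [' '] []) = false) :
    onvalLoop (n + 1) s
      = if 'o' ∈ s then
          (if PySem.Chars.strIsdigit (PySem.Chars.replace (s.takeWhile (· ≠ 'o')) [' '] []) = false
           then 0 else onvalLoop n ((s.dropWhile (· ≠ 'o')).tail))
        else onvalLoop n s := by
  by_cases h2 : 'o' ∈ s <;> simp [onvalLoop, h1, h2]

-- A's loop computes pvValid on an operator-free, parenthesis-free list
theorem onvalLoop_eq : ∀ (fuel : Nat) (s : List Char),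
    (∀ c ∈ s, c ∉ pvOps ∧ c ≠ '(' ∧ c ≠ ')') → PySem.List.count s 'o' < fuel →
    onvalLoop fuel s = if pvValid s false then 1 else 0 := by
  intro fuel
  induction fuel with
  | zero => intro s _ hc; omega
  | succ n ih =>
    intro s h hc
    by_cases h1 : PySem.Chars.strIsdigit (PySem.Chars.replace s [' '] []) = true
    · have ho : 'o' ∉ s := by
        intro hmem
        rw [strIsdigit_nospace_of_mem_o s hmem] at h1
        exact absurd h1 (by simp)
      have hplain : ∀ c ∈ s, c ∉ pvOps ∧ c ≠ 'o' ∧ c ≠ '(' ∧ c ≠ ')' := by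
        intro c hcm
        obtain ⟨a1, a2, a3⟩ := h c hcm
        exact ⟨a1, fun he => ho (he ▸ hcm), a2, a3⟩
      rw [strIsdigit_nospace, Bool.and_eq_true] at h1
      obtain ⟨ha, hb⟩ := h1
      simp [onvalLoop, strIsdigit_nospace, pvValid_plain s hplain false, ha, hb]
    · have h1' : PySem.Chars.strIsdigit (PySem.Chars.replace s [' '] []) = false := by
        simpa [Bool.not_eq_true] using h1
      rw [onvalLoop_succ_mem n s h1']
      by_cases h2 : 'o' ∈ s
      · rw [if_pos h2]
        have hsplit : s = s.takeWhile (· ≠ 'o') ++ 'o' :: (s.dropWhile (· ≠ 'o')).tail := by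
          conv_lhs => rw [← List.takeWhile_append_dropWhile (p := (· ≠ 'o')) (l := s)]
          rw [dropWhile_o_cons h2]
          simp
        set t := s.takeWhile (· ≠ 'o') with hT
        set r := (s.dropWhile (· ≠ 'o')).tail with hR
        have htmem : ∀ c ∈ t, c ∉ pvOps ∧ c ≠ 'o' ∧ c ≠ '(' ∧ c ≠ ')' := by
          intro c hcm
          obtain ⟨a1, a2, a3⟩ := h c ((List.takeWhile_sublist _).subset hcm)
          refine ⟨a1, ?_, a2, a3⟩
          have := List.mem_takeWhile_imp hcm
          simpa using this
        have hrmem : ∀ c ∈ r, c ∉ pvOps ∧ c ≠ '(' ∧ c ≠ ')' := by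
          intro c hcm
          exact h c (by rw [hsplit]; exact List.mem_append_right _ (List.mem_cons_of_mem _ hcm))
        have hcount : PySem.List.count r 'o' < n := by
          have heq : PySem.List.count s 'o' = PySem.List.count t 'o' + (PySem.List.count r 'o' + 1) := by
            simp only [PySem.List.count]
            conv_lhs => rw [hsplit]
            simp [List.count_append]
          have ht0 : PySem.List.count t 'o' = 0 := by
            simp only [PySem.List.count, List.count_eq_zero]
            intro hmem
            have := List.mem_takeWhile_imp hmem
            simp at this
          omega
        have hvs : pvValid s false
            = ((t.all (fun c => PySem.Chars.isdigit c || c == ' ')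
                && t.any PySem.Chars.isdigit) && pvValid r false) := by
          conv_lhs => rw [hsplit]
          rw [pvValid_split r t htmem false]
          simp
        by_cases h3 : PySem.Chars.strIsdigit (PySem.Chars.replace t [' '] []) = false
        · rw [if_pos h3, hvs]
          rw [strIsdigit_nospace] at h3
          simp [h3]
        · rw [if_neg h3]
          have h3' : PySem.Chars.strIsdigit (PySem.Chars.replace t [' '] []) = true := by
            simpa [Bool.not_eq_false] using h3
          rw [ih r hrmem hcount, hvs]
          rw [strIsdigit_nospace] at h3'
          simp [h3']
      · rw [if_neg h2]
        have hplain : ∀ c ∈ s, c ∉ pvOps ∧ c ≠ 'o' ∧ c ≠ '(' ∧ c ≠ ')' := by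
          intro c hcm
          obtain ⟨a1, a2, a3⟩ := h c hcm
          exact ⟨a1, fun he => h2 (he ▸ hcm), a2, a3⟩
        rw [onvalLoop_stuck n s h1' h2]
        rw [pvValid_plain s hplain false]
        rw [strIsdigit_nospace] at h1'
        simp only [Bool.false_or]
        rw [h1']
        rfl

-- A's preprocessing, fused into one character map
def pvMap (c : Char) : Char :=
  if c ∈ pvOps then 'o' else if c = '(' then ' ' else if c = ')' then ' ' else c

theorem pvMap_pointwise (c : Char) :
    (if (if (if c = '(' then ' ' else c) = ')' then ' ' else if c = '(' then ' ' else c) ∈ pvOps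
     then 'o' else (if (if c = '(' then ' ' else c) = ')' then ' ' else if c = '(' then ' ' else c))
      = pvMap c := by
  by_cases h1 : c = '(' ; · subst h1; decide
  by_cases h2 : c = ')' ; · subst h2; decide
  by_cases h3 : c ∈ pvOps
  · fin_cases h3 <;> decide
  · simp [pvMap, h1, h2, h3]

theorem sA_eq (E : String) :
    (PySem.Str.replace (PySem.Str.replace E "(" " ") ")" " ").toList.map
        (fun c => if c ∈ pvOps then 'o' else c)
      = E.toList.map pvMap := by
  rw [PySem.Str.toList_replace, PySem.Str.toList_replace]
  rw [show ("(" : String).toList = ['('] from rfl, show (")" : String).toList = [')'] from rfl,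
      show (" " : String).toList = [' '] from rfl]
  rw [chars_replace_single_map, chars_replace_single_map, List.map_map, List.map_map]
  refine List.map_congr_left (fun c _ => ?_)
  exact pvMap_pointwise c

theorem pvMap_good (x : Char) : pvMap x ∉ pvOps ∧ pvMap x ≠ '(' ∧ pvMap x ≠ ')' := by
  unfold pvMap
  by_cases h1 : x ∈ pvOps
  · rw [if_pos h1]; decide
  · rw [if_neg h1]
    by_cases h2 : x = '('
    · rw [if_pos h2]; decide
    · rw [if_neg h2]
      by_cases h3 : x = ')'
      · rw [if_pos h3]; decide
      · rw [if_neg h3]; exact ⟨h1, h2, h3⟩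

-- pvValid is invariant under A's preprocessing map
theorem pvValid_map (l : List Char) : ∀ hd, pvValid (l.map pvMap) hd = pvValid l hd := by
  induction l with
  | nil => intro hd; rfl
  | cons c t ih =>
    intro hd
    by_cases h1 : c ∈ pvOps
    · have : pvMap c = 'o' := by simp [pvMap, h1]
      simp [pvValid, this, h1, ih]
    · by_cases h2 : c = '('
      · subst h2
        have : pvMap '(' = ' ' := by decide
        simp [pvValid, this, ih, show (' ' : Char) ∉ pvOps from by decide,
          show ('(' : Char) ∉ pvOps from by decide,
          show PySem.Chars.isdigit ' ' = false from by decide,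
          show PySem.Chars.isdigit '(' = false from by decide,
          show (' ' : Char) ≠ 'o' from by decide, show ('(' : Char) ≠ 'o' from by decide]
      · by_cases h3 : c = ')'
        · subst h3
          have : pvMap ')' = ' ' := by decide
          simp [pvValid, this, ih, show (' ' : Char) ∉ pvOps from by decide,
            show (')' : Char) ∉ pvOps from by decide,
            show PySem.Chars.isdigit ' ' = false from by decide,
            show PySem.Chars.isdigit ')' = false from by decide,
            show (' ' : Char) ≠ 'o' from by decide, show (')' : Char) ≠ 'o' from by decide]
        · have : pvMap c = c := by simp [pvMap, h1, h2, h3]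
          simp [pvValid, this, ih]

-- A's result, characterised
theorem on_validation_eq (E : String) :
    on_validation E = if pvValid E.toList false then 1 else 0 := by
  simp only [on_validation]
  rw [sA_eq]
  rw [onvalLoop_eq _ _ (by
        intro c hc
        obtain ⟨x, _, hx⟩ := List.mem_map.mp hc
        exact hx ▸ pvMap_good x)
      (by omega)]
  rw [pvValid_map]

-- B's result on an 'o'-free string
theorem onvalScan_no_o : ∀ (l : List Char), 'o' ∉ l → ∀ hd,
    onvalScan l hd = if pvValid l hd then 1 else 0 := by
  intro l
  induction l with
  | nil => intro _ hd; cases hd <;> rfl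
  | cons c t ih =>
    intro ho hd
    have hco : c ≠ 'o' := fun he => ho (he ▸ List.mem_cons_self ..)
    have hto : 'o' ∉ t := fun ht => ho (List.mem_cons_of_mem _ ht)
    by_cases h1 : c ∈ pvOps
    · cases hd with
      | false => simp [onvalScan, pvValid, h1]
      | true => simp [onvalScan, pvValid, h1, ih hto]
    · by_cases h2 : PySem.Chars.isdigit c = true
      · simp [onvalScan, pvValid, h1, h2, hco, ih hto]
      · by_cases h3 : c = ' ' ∨ c = '(' ∨ c = ')'
        · simp [onvalScan, pvValid, h1, h2, hco, h3, ih hto]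
        · simp [onvalScan, pvValid, h1, h2, hco, h3]

-- B rejects any string containing a literal 'o'
theorem onvalScan_has_o : ∀ (l : List Char), 'o' ∈ l → ∀ hd, onvalScan l hd = 0 := by
  intro l
  induction l with
  | nil => intro h; cases h
  | cons c t ih =>
    intro ho hd
    by_cases hc : c = 'o'
    · subst hc
      simp [onvalScan, show ('o' : Char) ∉ pvOps by decide,
        show PySem.Chars.isdigit 'o' = false by decide]
    · have hto : 'o' ∈ t := by
        rcases List.mem_cons.mp ho with h1 | h1
        · exact absurd h1.symm hc
        · exact h1
      by_cases h1 : c ∈ pvOps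
      · cases hd <;> simp [onvalScan, h1, ih hto]
      · by_cases h2 : PySem.Chars.isdigit c = true
        · simp [onvalScan, h1, h2, ih hto]
        · by_cases h3 : c = ' ' ∨ c = '(' ∨ c = ')'
          · simp [onvalScan, h1, h2, h3, ih hto]
          · simp [onvalScan, h1, h2, h3]

-- ===== VERDICT (by name: the statement is the Claim_ definition above) =====
theorem on_validation_spec : Claim_unchanged_on_validation := by
  intro E _ hnD
  unfold on_validation_alt
  rw [on_validation_eq]
  by_cases ho : 'o' ∈ E.toList
  · have hv : pvValid E.toList false = false := by
      by_contra h
      refine hnD ⟨ho, ?_⟩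
      rw [pvSep_eq, pvSegB_eq]
      exact (pvValid_false_iff _).mp (by simpa [Bool.not_eq_false] using h)
    rw [onvalScan_has_o _ ho, hv]
    simp
  · rw [onvalScan_no_o _ ho]

theorem on_validation_changed : Claim_changed_on_validation := by
  unfold Claim_changed_on_validation; decide

theorem on_validation_tight : Claim_exact_on_validation := by
  intro E _ hD
  obtain ⟨ho, hsegs⟩ := hD
  rw [pvSep_eq, pvSegB_eq] at hsegs
  rw [on_validation_eq, (pvValid_false_iff _).mpr hsegs]
  unfold on_validation_alt
  rw [onvalScan_has_o _ ho]
  simp
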